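-- pv_equiv track=rewrite | github.com/irisitystefannilsson/AdventOfCode2025 | day03.py | find_max_digit
-- ===== SOURCE A (Python) =====
-- def find_max_digit(bank : str, start_dist : int, end_dist : int):
--     max_digit = 0
--     it = 0
--     for it in range(start_dist, len(bank) - end_dist):
--         max_digit = max(max_digit, int(bank[it]))
--     for it in range(start_dist, len(bank) - end_dist):
--         if int(bank[it]) == max_digit:
--             break
--     return max_digit, it
-- ===== SOURCE B (Python) =====
-- def find_max_digit(bank: str, start_dist: int, end_dist: int):
--     rng = range(start_dist, len(bank) - end_dist)
--     if not rng:
--         return 0, 0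
--     it = max(rng, key=lambda i: int(bank[i]))
--     return int(bank[it]), it
-- ===== Notes on version B (the rewrite author's own statement) =====
-- stated objective: simpler
-- what changed: B replaces A's two sequential passes (one running max over the window, then a rescan for the first index holding it) by a single argmax pass: max(range, key=...) keeps the first maximal index, so one scan yields both the value and its first position.
import Mathlib
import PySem

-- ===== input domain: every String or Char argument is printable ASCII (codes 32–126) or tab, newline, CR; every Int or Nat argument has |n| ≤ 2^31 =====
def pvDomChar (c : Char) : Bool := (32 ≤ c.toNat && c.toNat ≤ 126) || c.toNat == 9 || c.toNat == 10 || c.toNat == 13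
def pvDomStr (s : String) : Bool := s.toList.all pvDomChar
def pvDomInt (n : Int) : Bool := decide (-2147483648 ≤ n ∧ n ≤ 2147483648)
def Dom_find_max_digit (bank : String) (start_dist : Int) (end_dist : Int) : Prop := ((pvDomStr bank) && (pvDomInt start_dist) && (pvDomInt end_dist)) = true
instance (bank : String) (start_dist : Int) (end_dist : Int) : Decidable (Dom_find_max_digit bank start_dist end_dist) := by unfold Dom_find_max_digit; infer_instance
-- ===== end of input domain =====

-- B collapses A's two passes (running max, then rescan for the first index holding it) into one
-- argmax pass via max(range, key=...), which keeps the first maximal index. Equivalence of return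
-- values is proved on Pre_ (every scanned position an in-range ASCII digit; elsewhere Python raises).

-- ===== PORT A =====
-- int(bank[i]): exact when bank[i] is an in-range ASCII digit; Pre_ excludes the other
-- cases, where Python raises IndexError / ValueError.
def pvDigit (bank : String) (i : Int) : Int :=
  match PySem.Str.pyGet? bank i with
  | some c => if c.isDigit then ((c.toNat : Int) - 48) else 0
  | none => 0

-- A's second loop: 'for it in rng: if int(bank[it]) == max_digit: break' — returns the first
-- matching index, else the last index scanned, else the incoming value of it.
def pvFindLoop (bank : String) (md : Int) : List Int → Int → Int
  | [], cur => cur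
  | i :: rest, _ => if pvDigit bank i = md then i else pvFindLoop bank md rest i

def find_max_digit (bank : String) (start_dist : Int) (end_dist : Int) : Int × Int :=
  let rng := PySem.List.pyRange start_dist (PySem.Str.len bank - end_dist) 1
  let max_digit := rng.foldl (fun m i => max m (pvDigit bank i)) 0
  let it := pvFindLoop bank max_digit rng 0
  (max_digit, it)

-- ===== PORT B =====
def find_max_digit_alt (bank : String) (start_dist : Int) (end_dist : Int) : Int × Int :=
  let rng := PySem.List.pyRange start_dist (PySem.Str.len bank - end_dist) 1
  match PySem.List.max? rng (fun i => pvDigit bank i) with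
  | none => (0, 0)          -- 'if not rng: return 0, 0' (max? is none exactly on the empty range)
  | some it => (pvDigit bank it, it)

-- ===== PRECONDITION & SPEC =====
-- Pre_: the scanned window is empty, or it lies inside the valid index range and every scanned
-- position holds an ASCII digit; on the excluded inputs Python A (and B alike) raises IndexError
-- or ValueError at int(bank[it]).  (The explicit bounds are implied by pvOkDigit on a nonempty
-- window; they are spelled out so the condition is checkable without enumerating a huge range.)
def pvOkDigit (bank : String) (i : Int) : Bool :=
  match PySem.Str.pyGet? bank i with
  | some c => c.isDigit
  | none => false

def Pre_find_max_digit (bank : String) (start_dist : Int) (end_dist : Int) : Prop :=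
  PySem.Str.len bank - end_dist ≤ start_dist ∨
    (-(PySem.Str.len bank) ≤ start_dist ∧ 0 ≤ end_dist ∧
      ∀ i ∈ PySem.List.pyRange start_dist (PySem.Str.len bank - end_dist) 1, pvOkDigit bank i = true)
instance (bank : String) (start_dist : Int) (end_dist : Int) : Decidable (Pre_find_max_digit bank start_dist end_dist) := by unfold Pre_find_max_digit; infer_instance

def pvWitness_find_max_digit : String × Int × Int := ("314159", 1, 2)

def Spec_find_max_digit (bank : String) (start_dist : Int) (end_dist : Int) (out : Int × Int) : Prop := out = find_max_digit_alt bank start_dist end_dist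
instance (bank : String) (start_dist : Int) (end_dist : Int) (out : Int × Int) : Decidable (Spec_find_max_digit bank start_dist end_dist out) := by unfold Spec_find_max_digit; infer_instance

-- ===== CLAIM (what is proved, stated in full; the proofs are below) =====
def Claim_equal_find_max_digit : Prop := ∀ (bank : String) (start_dist : Int) (end_dist : Int), Dom_find_max_digit bank start_dist end_dist → Pre_find_max_digit bank start_dist end_dist → Spec_find_max_digit bank start_dist end_dist (find_max_digit bank start_dist end_dist)

-- ===== LEMMAS AND PROOFS =====

-- max? on a nonempty list is the strict-greater argmax fold started at the head.
lemma pv_max?_cons (d : Int → Int) (L : List Int) : ∀ b : Int,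
    PySem.List.max? (b :: L) d = some (L.foldl (fun m x => if d m < d x then x else m) b) := by
  induction L with
  | nil => intro b; rfl
  | cons i rest ih =>
    intro b
    have h1 : PySem.List.max? (b :: i :: rest) d
        = PySem.List.max? ((if d b < d i then i else b) :: rest) d := by
      by_cases h : d b < d i <;> simp [PySem.List.max?, List.foldl, h]
    rw [h1, ih]
    simp only [List.foldl]

-- the digit value of the argmax fold is the running max of the digit values
lemma pv_fB_val (d : Int → Int) (L : List Int) : ∀ b : Int,
    d (L.foldl (fun m x => if d m < d x then x else m) b)
      = L.foldl (fun m i => max m (d i)) (d b) := by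
  induction L with
  | nil => intro b; simp
  | cons i rest ih =>
    intro b
    by_cases h : d b < d i
    · simp only [List.foldl, if_pos h, ih]
      rw [(by omega : max (d b) (d i) = d i)]
    · simp only [List.foldl, if_neg h, ih]
      rw [(by omega : max (d b) (d i) = d b)]

-- the argmax fold stays at b when nothing strictly exceeds it
lemma pv_fB_const (d : Int → Int) (L : List Int) : ∀ b : Int, (∀ i ∈ L, d i ≤ d b) →
    L.foldl (fun m x => if d m < d x then x else m) b = b := by
  induction L with
  | nil => intro b _; rfl
  | cons i rest ih =>
    intro b h
    have hi : d i ≤ d b := h i (by simp)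
    simp only [List.foldl, if_neg (by omega : ¬ d b < d i)]
    exact ih b (fun j hj => h j (by simp [hj]))

-- the running max is its seed or attained on the list
lemma pv_fA_attained (d : Int → Int) (L : List Int) : ∀ m : Int,
    L.foldl (fun a i => max a (d i)) m = m ∨ ∃ i ∈ L, L.foldl (fun a i => max a (d i)) m = d i := by
  induction L with
  | nil => intro m; left; rfl
  | cons i rest ih =>
    intro m
    have hfold : (i :: rest).foldl (fun a i => max a (d i)) m
        = rest.foldl (fun a i => max a (d i)) (max m (d i)) := by simp [List.foldl]
    rcases ih (max m (d i)) with h | ⟨j, hj, hje⟩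
    · by_cases hm : d i ≤ m
      · left; rw [hfold, h]; omega
      · right; exact ⟨i, by simp, by rw [hfold, h]; omega⟩
    · right; exact ⟨j, by simp [hj], by rw [hfold]; exact hje⟩

-- A's break loop does not depend on the incoming value of it when the target is attained
lemma pv_findLoop_indep (bank : String) (v : Int) (L : List Int)
    (h : L ≠ []) : ∀ c c', pvFindLoop bank v L c = pvFindLoop bank v L c' := by
  cases L with
  | nil => exact absurd rfl h
  | cons i rest =>
    intro c c'
    by_cases hd : pvDigit bank i = v <;> simp [pvFindLoop, hd]

-- key lemma: A's rescan for the running max equals B's first-argmax fold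
lemma pv_key (bank : String) (L : List Int) : ∀ (b c : Int),
    pvFindLoop bank (L.foldl (fun m i => max m (pvDigit bank i)) (pvDigit bank b)) (b :: L) c
      = L.foldl (fun m x => if pvDigit bank m < pvDigit bank x then x else m) b := by
  induction L with
  | nil => intro b c; simp [pvFindLoop]
  | cons i rest ih =>
    intro b c
    by_cases h : pvDigit bank b < pvDigit bank i
    · have hmax : max (pvDigit bank b) (pvDigit bank i) = pvDigit bank i := by omega
      have hM : pvDigit bank b
          < rest.foldl (fun m j => max m (pvDigit bank j)) (pvDigit bank i) :=
        lt_of_lt_of_le h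
          (PySem.List.le_foldl_max_int rest (fun j => pvDigit bank j) (pvDigit bank i)).1
      simp only [List.foldl, hmax, if_pos h]
      simp only [pvFindLoop, if_neg (by omega :
        ¬ pvDigit bank b = rest.foldl (fun m j => max m (pvDigit bank j)) (pvDigit bank i))]
      exact ih i b
    · have hmax : max (pvDigit bank b) (pvDigit bank i) = pvDigit bank b := by omega
      simp only [List.foldl, hmax, if_neg h]
      have hbM : pvDigit bank b ≤ rest.foldl (fun m j => max m (pvDigit bank j)) (pvDigit bank b) :=
        (PySem.List.le_foldl_max_int rest (fun j => pvDigit bank j) (pvDigit bank b)).1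
      by_cases hM : rest.foldl (fun m j => max m (pvDigit bank j)) (pvDigit bank b) = pvDigit bank b
      · have hle : ∀ j ∈ rest, pvDigit bank j ≤ pvDigit bank b := by
          intro j hj
          have := (PySem.List.le_foldl_max_int rest (fun j => pvDigit bank j) (pvDigit bank b)).2 j hj
          omega
        rw [pv_fB_const (pvDigit bank) rest b hle, hM]
        simp [pvFindLoop]
      · have hatt : ∃ j ∈ rest,
            pvDigit bank j = rest.foldl (fun m j => max m (pvDigit bank j)) (pvDigit bank b) := by
          rcases pv_fA_attained (pvDigit bank) rest (pvDigit bank b) with h' | ⟨j, hj, hje⟩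
          · exact absurd h' hM
          · exact ⟨j, hj, hje.symm⟩
        have hbne : ¬ pvDigit bank b
            = rest.foldl (fun m j => max m (pvDigit bank j)) (pvDigit bank b) := by omega
        have hine : ¬ pvDigit bank i
            = rest.foldl (fun m j => max m (pvDigit bank j)) (pvDigit bank b) := by omega
        have hIH := ih b c
        simp only [pvFindLoop, if_neg hbne] at hIH
        simp only [pvFindLoop, if_neg hbne, if_neg hine]
        rcases hatt with ⟨j, hj, _⟩
        rw [pv_findLoop_indep bank _ rest (List.ne_nil_of_mem hj) i b, hIH]

-- an accepted position has a nonnegative digit value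
lemma pv_ok_nonneg (bank : String) (i : Int) (h : pvOkDigit bank i = true) :
    0 ≤ pvDigit bank i := by
  unfold pvOkDigit at h
  unfold pvDigit
  cases hg : PySem.Str.pyGet? bank i with
  | none => simp
  | some c =>
    rw [hg] at h
    have h48 : 48 ≤ c.toNat := by
      simp [Char.isDigit, UInt32.le_iff_toNat_le] at h
      exact h.1
    simp only [h, if_pos]
    omega

-- ===== VERDICT (by name: the statement is the Claim_ definition above) =====
theorem find_max_digit_spec : Claim_equal_find_max_digit := by
  intro bank start_dist end_dist _hDom hPre
  unfold Spec_find_max_digit find_max_digit find_max_digit_alt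
  cases hrng : PySem.List.pyRange start_dist (PySem.Str.len bank - end_dist) 1 with
  | nil => simp [PySem.List.max?, pvFindLoop]
  | cons b L =>
    have hbmem : b ∈ PySem.List.pyRange start_dist (PySem.Str.len bank - end_dist) 1 := by
      rw [hrng]; simp
    have hb : pvOkDigit bank b = true := by
      rcases hPre with hle | ⟨_, _, hall⟩
      · exact absurd (PySem.List.mem_pyRange_one.mp hbmem) (by omega)
      · exact hall b hbmem
    have hb0 : 0 ≤ pvDigit bank b := pv_ok_nonneg bank b hb
    dsimp only
    rw [pv_max?_cons (pvDigit bank) L b]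
    have hinit : (b :: L).foldl (fun m i => max m (pvDigit bank i)) 0
        = L.foldl (fun m i => max m (pvDigit bank i)) (pvDigit bank b) := by
      simp only [List.foldl]
      rw [(by omega : max 0 (pvDigit bank b) = pvDigit bank b)]
    simp only [hinit]
    rw [pv_key bank L b 0, pv_fB_val (pvDigit bank) L b]
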